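-- pv_equiv track=rewrite | github.com/lobbies03/python | spielwiese/cowsAndBulls2.py | CompareNumbers
-- ===== SOURCE A (Python) =====
-- def CompareNumbers(inputNumbers, searchedNumbers):
--     cowBull = [0, 0]
--     for i in range(len(searchedNumbers)):
--         if inputNumbers[i] == searchedNumbers[i]:
--             cowBull[1] += 1
--         else:
--             for j in range(i, len(searchedNumbers)):
--                 if not i == j:
--                     if inputNumbers[j] == searchedNumbers[j]:
--                         cowBull[0] += 1
--     return cowBull
-- ===== SOURCE B (Python) =====
-- def CompareNumbers(inputNumbers, searchedNumbers):
--     # One right-to-left pass: 'bulls' is the running count of matching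
--     # positions in the suffix already seen; each mismatch adds that count
--     # (the matches strictly after it) to 'cows'.
--     cows = 0
--     bulls = 0
--     for i in range(len(searchedNumbers) - 1, -1, -1):
--         if inputNumbers[i] == searchedNumbers[i]:
--             bulls += 1
--         else:
--             cows += bulls
--     return [cows, bulls]
-- ===== Notes on version B (the rewrite author's own statement) =====
-- stated objective: faster
-- what changed: Replaces the quadratic rescan of the suffix after every mismatch by a single right-to-left pass that keeps a running suffix-match count.
import Mathlib
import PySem

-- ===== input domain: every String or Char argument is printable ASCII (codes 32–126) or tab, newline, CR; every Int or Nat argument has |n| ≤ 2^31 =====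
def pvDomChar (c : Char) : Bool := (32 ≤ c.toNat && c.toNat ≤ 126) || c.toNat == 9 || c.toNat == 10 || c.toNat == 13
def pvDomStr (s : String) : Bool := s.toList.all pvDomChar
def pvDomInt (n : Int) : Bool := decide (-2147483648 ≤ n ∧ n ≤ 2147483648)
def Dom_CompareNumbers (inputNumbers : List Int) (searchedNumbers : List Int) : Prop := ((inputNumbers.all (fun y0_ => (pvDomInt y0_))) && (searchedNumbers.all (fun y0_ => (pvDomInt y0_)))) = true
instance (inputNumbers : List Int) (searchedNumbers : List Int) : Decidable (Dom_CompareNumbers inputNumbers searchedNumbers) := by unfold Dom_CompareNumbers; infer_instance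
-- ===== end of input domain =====

-- B replaces A's rescan of the suffix after every mismatch by one right-to-left pass
-- keeping a running suffix-match count (objective: faster).

-- ===== PORT A =====
def CompareNumbers (inputNumbers : List Int) (searchedNumbers : List Int) : List Int :=
  let n : Int := searchedNumbers.length
  let cowBull : Int × Int :=
    (PySem.List.pyRange 0 n 1).foldl
      (fun cb i =>
        if PySem.List.pyGetD inputNumbers i 0 = PySem.List.pyGetD searchedNumbers i 0 then
          (cb.1, cb.2 + 1)
        else
          (PySem.List.pyRange i n 1).foldl
            (fun cb' j =>
              if ¬ i = j then
                if PySem.List.pyGetD inputNumbers j 0 = PySem.List.pyGetD searchedNumbers j 0 then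
                  (cb'.1 + 1, cb'.2)
                else cb'
              else cb')
            cb)
      (0, 0)
  [cowBull.1, cowBull.2]

-- ===== PORT B =====
def CompareNumbers_alt (inputNumbers : List Int) (searchedNumbers : List Int) : List Int :=
  let n : Int := searchedNumbers.length
  let cb : Int × Int :=
    (PySem.List.pyRange (n - 1) (-1) (-1)).foldl
      (fun (cb : Int × Int) i =>
        if PySem.List.pyGetD inputNumbers i 0 = PySem.List.pyGetD searchedNumbers i 0 then
          (cb.1, cb.2 + 1)
        else
          (cb.1 + cb.2, cb.2))
      (0, 0)
  [cb.1, cb.2]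

-- ===== PRECONDITION & SPEC =====
-- Pre_ excludes exactly the inputs where Python A raises IndexError:
-- inputNumbers shorter than searchedNumbers.
def Pre_CompareNumbers (inputNumbers : List Int) (searchedNumbers : List Int) : Prop :=
  searchedNumbers.length ≤ inputNumbers.length
instance (inputNumbers : List Int) (searchedNumbers : List Int) : Decidable (Pre_CompareNumbers inputNumbers searchedNumbers) := by unfold Pre_CompareNumbers; infer_instance

def pvWitness_CompareNumbers : List Int × List Int := ([1, 2, 3], [1, 0, 3])

def Spec_CompareNumbers (inputNumbers : List Int) (searchedNumbers : List Int) (out : List Int) : Prop := out = CompareNumbers_alt inputNumbers searchedNumbers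
instance (inputNumbers : List Int) (searchedNumbers : List Int) (out : List Int) : Decidable (Spec_CompareNumbers inputNumbers searchedNumbers out) := by unfold Spec_CompareNumbers; infer_instance

-- ===== CLAIM (what is proved, stated in full; the proofs are below) =====
def Claim_equal_CompareNumbers : Prop := ∀ (inputNumbers : List Int) (searchedNumbers : List Int), Dom_CompareNumbers inputNumbers searchedNumbers → Pre_CompareNumbers inputNumbers searchedNumbers → Spec_CompareNumbers inputNumbers searchedNumbers (CompareNumbers inputNumbers searchedNumbers)

-- ===== LEMMAS AND PROOFS =====

-- number of matching positions in [a, b) (as an Int)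
def pvCnt (p : Int → Prop) [DecidablePred p] (a b : Int) : Int :=
  ((PySem.List.pyRange a b 1).map (fun j => if p j then (1 : Int) else 0)).sum

-- sum over mismatching k in [a, b) of the match count in (k, b)
def pvCows (p : Int → Prop) [DecidablePred p] (a b : Int) : Int :=
  ((PySem.List.pyRange a b 1).map (fun k => if p k then 0 else pvCnt p (k + 1) b)).sum

lemma pvCnt_nil (p : Int → Prop) [DecidablePred p] (a b : Int) (h : b ≤ a) : pvCnt p a b = 0 := by
  simp [pvCnt, PySem.List.pyRange_one_eq_nil h]

lemma pvCnt_cons (p : Int → Prop) [DecidablePred p] (a b : Int) (h : a < b) :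
    pvCnt p a b = (if p a then (1 : Int) else 0) + pvCnt p (a + 1) b := by
  simp [pvCnt, PySem.List.pyRange_one_cons h]

lemma pvCows_cons (p : Int → Prop) [DecidablePred p] (a b : Int) (h : a < b) :
    pvCows p a b = (if p a then 0 else pvCnt p (a + 1) b) + pvCows p (a + 1) b := by
  simp [pvCows, PySem.List.pyRange_one_cons h]

-- A's inner loop over range(a, b) adds the match count of [a, b) \ {i} to the cow slot,
-- provided i < a (so the "j == i" guard never fires)
lemma pvInner (p : Int → Prop) [DecidablePred p] (i b : Int) :
    ∀ (a : Int) (c u : Int), i < a →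
      (PySem.List.pyRange a b 1).foldl
        (fun cb' j => if ¬ i = j then (if p j then (cb'.1 + 1, cb'.2) else cb') else cb')
        (c, u) = (c + pvCnt p a b, u) := by
  intro a
  by_cases hab : b ≤ a
  · intro c u _
    simp [PySem.List.pyRange_one_eq_nil hab, pvCnt_nil p a b hab]
  · rw [not_le] at hab
    have hrec := pvInner p i b (a + 1)
    intro c u hia
    rw [PySem.List.pyRange_one_cons hab]
    simp only [List.foldl_cons]
    have hne : ¬ i = a := by omega
    rw [pvCnt_cons p a b hab]
    by_cases hpa : p a
    · simp only [hne, hpa, if_true, not_false_eq_true]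
      rw [hrec (c + 1) u (by omega)]
      ring_nf
    · simp only [hne, hpa, if_false, not_false_eq_true, if_true]
      rw [hrec c u (by omega)]
      ring_nf
termination_by a => (b - a).toNat
decreasing_by omega

-- A's outer loop from a with state (c, u) lands on (c + pvCows a b, u + pvCnt a b)
lemma pvOuterA (p : Int → Prop) [DecidablePred p] (b : Int) :
    ∀ (a : Int) (c u : Int),
      (PySem.List.pyRange a b 1).foldl
        (fun cb i =>
          if p i then (cb.1, cb.2 + 1)
          else
            (PySem.List.pyRange i b 1).foldl
              (fun cb' j => if ¬ i = j then (if p j then (cb'.1 + 1, cb'.2) else cb') else cb')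
              cb)
        (c, u) = (c + pvCows p a b, u + pvCnt p a b) := by
  intro a
  by_cases hab : b ≤ a
  · intro c u
    simp [PySem.List.pyRange_one_eq_nil hab, pvCnt_nil p a b hab, pvCows, ]
  · rw [not_le] at hab
    have hrec := pvOuterA p b (a + 1)
    intro c u
    rw [PySem.List.pyRange_one_cons hab]
    simp only [List.foldl_cons]
    rw [pvCnt_cons p a b hab, pvCows_cons p a b hab]
    by_cases hpa : p a
    · simp only [hpa, if_true]
      rw [hrec c (u + 1)]
      ring_nf
    · simp only [hpa, if_false]
      -- inner loop: first element a is skipped (i = a), rest counted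
      have hin : (PySem.List.pyRange a b 1).foldl
          (fun cb' j => if ¬ a = j then (if p j then (cb'.1 + 1, cb'.2) else cb') else cb')
          (c, u) = (c + pvCnt p (a + 1) b, u) := by
        rw [PySem.List.pyRange_one_cons hab]
        simp only [List.foldl_cons, not_true, ite_false]
        exact pvInner p a b (a + 1) c u (by omega)
      rw [hin, hrec (c + pvCnt p (a + 1) b) u]
      ring_nf
termination_by a => (b - a).toNat
decreasing_by omega

-- B's right-to-left loop computes the same pair
lemma pvOuterB (p : Int → Prop) [DecidablePred p] (b : Int) :
    ∀ (a : Int),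
      List.foldr
        (fun i (cb : Int × Int) =>
          if p i then (cb.1, cb.2 + 1) else (cb.1 + cb.2, cb.2))
        (0, 0) (PySem.List.pyRange a b 1) = (pvCows p a b, pvCnt p a b) := by
  intro a
  by_cases hab : b ≤ a
  · simp [PySem.List.pyRange_one_eq_nil hab, pvCnt_nil p a b hab, pvCows]
  · rw [not_le] at hab
    have hrec := pvOuterB p b (a + 1)
    rw [PySem.List.pyRange_one_cons hab]
    simp only [List.foldr_cons, hrec]
    rw [pvCnt_cons p a b hab, pvCows_cons p a b hab]
    by_cases hpa : p a <;> simp [hpa] <;> ring_nf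
termination_by a => (b - a).toNat
decreasing_by omega

-- ===== VERDICT (by name: the statement is the Claim_ definition above) =====
theorem CompareNumbers_spec : Claim_equal_CompareNumbers := by
  intro inp sear _ _
  unfold Spec_CompareNumbers CompareNumbers CompareNumbers_alt
  set p : Int → Prop := fun i =>
    PySem.List.pyGetD inp i 0 = PySem.List.pyGetD sear i 0 with hp
  have hA := pvOuterA p (sear.length : Int) 0 0 0
  have hB := pvOuterB p (sear.length : Int) 0
  simp only [hp] at hA hB
  simp only [PySem.List.pyRange_neg_one_eq_reverse]
  norm_num
  simp only [ite_not] at hA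
  rw [hA, hB]
  norm_num
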